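-- pv_equiv track=rewrite | github.com/ishanprogs/papersense2 | AskQuestion/__init__.py | intelligent_chunk_prioritization_for_csv
-- ===== SOURCE A (Python) =====
-- def intelligent_chunk_prioritization_for_csv(search_results, user_question):
--     """Specialized chunk prioritization for CSV data"""
--
--     priority_chunks = {
--         'data_records': [],       # Actual data rows
--         'column_info': [],        # Column definitions
--         'statistics': [],         # Summary statistics
--         'key_value_pairs': [],    # Searchable pairs
--         'general': []             # Other content
--     }
--
--     question_lower = user_question.lower()
--
--     for result in search_results:
--         content = result['content'].lower()
--
--         # Prioritize based on CSV content type
--         if 'record' in content and ('row' in content or ':' in content):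
--             priority_chunks['data_records'].append(result)
--         elif 'column' in content and ('information' in content or 'summary' in content):
--             priority_chunks['column_info'].append(result)
--         elif any(stat in content for stat in ['average', 'min', 'max', 'total', 'count', 'summary']):
--             priority_chunks['statistics'].append(result)
--         elif 'contains' in content or 'key-value' in content:
--             priority_chunks['key_value_pairs'].append(result)
--         else:
--             priority_chunks['general'].append(result)
--
--     # Return prioritized results based on query type
--     if any(word in question_lower for word in ['find', 'search', 'show', 'records']):
--         # Prioritize data records for search queries
--         return (priority_chunks['data_records'] + priority_chunks['key_value_pairs'] +
--                 priority_chunks['column_info'] + priority_chunks['statistics'] +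
--                 priority_chunks['general'])
--     elif any(word in question_lower for word in ['count', 'total', 'how many', 'statistics']):
--         # Prioritize statistics for count queries
--         return (priority_chunks['statistics'] + priority_chunks['column_info'] +
--                 priority_chunks['data_records'] + priority_chunks['key_value_pairs'] +
--                 priority_chunks['general'])
--     else:
--         # Default prioritization
--         return (priority_chunks['column_info'] + priority_chunks['data_records'] +
--                 priority_chunks['statistics'] + priority_chunks['key_value_pairs'] +
--                 priority_chunks['general'])
-- ===== SOURCE B (Python) =====
-- def intelligent_chunk_prioritization_for_csv(search_results, user_question):
--     """Single stable sort by a computed priority rank instead of five buckets + concatenation."""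
--     q = user_question.lower()
--     if any(w in q for w in ('find', 'search', 'show', 'records')):
--         rank = [0, 2, 3, 1, 4]          # data_records, kv_pairs, column_info, statistics, general
--     elif any(w in q for w in ('count', 'total', 'how many', 'statistics')):
--         rank = [2, 1, 0, 3, 4]          # statistics, column_info, data_records, kv_pairs, general
--     else:
--         rank = [1, 0, 2, 3, 4]          # column_info, data_records, statistics, kv_pairs, general
--
--     def category(result):
--         content = result['content'].lower()
--         if 'record' in content and ('row' in content or ':' in content):
--             return 0                    # data_records
--         if 'column' in content and ('information' in content or 'summary' in content):
--             return 1                    # column_info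
--         if any(s in content for s in ('average', 'min', 'max', 'total', 'count', 'summary')):
--             return 2                    # statistics
--         if 'contains' in content or 'key-value' in content:
--             return 3                    # key_value_pairs
--         return 4                        # general
--
--     return sorted(search_results, key=lambda r: rank[category(r)])
-- ===== Notes on version B (the rewrite author's own statement) =====
-- stated objective: alternative
-- what changed: Replaces A's five append-buckets plus branch-dependent concatenation by computing a per-result priority rank (category classified with the same precedence, ranked by the query-dependent order) and returning one stable sort by that rank.
import Mathlib
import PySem

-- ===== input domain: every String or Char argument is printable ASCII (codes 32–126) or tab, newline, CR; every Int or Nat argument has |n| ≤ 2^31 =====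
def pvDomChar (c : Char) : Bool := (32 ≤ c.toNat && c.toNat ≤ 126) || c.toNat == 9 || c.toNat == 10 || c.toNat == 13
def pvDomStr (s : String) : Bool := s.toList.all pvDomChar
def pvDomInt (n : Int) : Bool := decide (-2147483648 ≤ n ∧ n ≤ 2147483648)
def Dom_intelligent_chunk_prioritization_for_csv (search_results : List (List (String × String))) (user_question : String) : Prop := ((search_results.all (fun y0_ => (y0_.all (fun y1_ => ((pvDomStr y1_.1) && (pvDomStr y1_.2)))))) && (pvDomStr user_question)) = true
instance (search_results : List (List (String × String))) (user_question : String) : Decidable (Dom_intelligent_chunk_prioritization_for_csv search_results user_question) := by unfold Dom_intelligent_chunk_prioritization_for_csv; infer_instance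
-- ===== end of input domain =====

-- B replaces A's five append-buckets + concatenation by one stable sort over a computed priority rank (objective: alternative).


-- ===== PORT A =====
-- result['content'].lower(); the .getD "" is only reached outside Pre_ (Python raises KeyError there)
def pvContent (result : List (String × String)) : String :=
  PySem.Str.lower (((PySem.Dict.mk result).get? "content").getD "")

-- the loop body of A: classify one result into the five buckets (same branch order as the Python)
def pvStepA
    (acc : List (List (String × String)) × List (List (String × String)) × List (List (String × String)) × List (List (String × String)) × List (List (String × String)))
    (result : List (String × String)) :
    List (List (String × String)) × List (List (String × String)) × List (List (String × String)) × List (List (String × String)) × List (List (String × String)) :=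
  if PySem.Str.isIn "record" (pvContent result) && (PySem.Str.isIn "row" (pvContent result) || PySem.Str.isIn ":" (pvContent result)) then
    (acc.1 ++ [result], acc.2.1, acc.2.2.1, acc.2.2.2.1, acc.2.2.2.2)
  else if PySem.Str.isIn "column" (pvContent result) && (PySem.Str.isIn "information" (pvContent result) || PySem.Str.isIn "summary" (pvContent result)) then
    (acc.1, acc.2.1 ++ [result], acc.2.2.1, acc.2.2.2.1, acc.2.2.2.2)
  else if (["average", "min", "max", "total", "count", "summary"].any (fun stat => PySem.Str.isIn stat (pvContent result))) then
    (acc.1, acc.2.1, acc.2.2.1 ++ [result], acc.2.2.2.1, acc.2.2.2.2)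
  else if PySem.Str.isIn "contains" (pvContent result) || PySem.Str.isIn "key-value" (pvContent result) then
    (acc.1, acc.2.1, acc.2.2.1, acc.2.2.2.1 ++ [result], acc.2.2.2.2)
  else
    (acc.1, acc.2.1, acc.2.2.1, acc.2.2.2.1, acc.2.2.2.2 ++ [result])

def intelligent_chunk_prioritization_for_csv (search_results : List (List (String × String))) (user_question : String) : List (List (String × String)) :=
  let p := search_results.foldl pvStepA ([], [], [], [], [])
  if (["find", "search", "show", "records"].any (fun word => PySem.Str.isIn word (PySem.Str.lower user_question))) then
    p.1 ++ p.2.2.2.1 ++ p.2.1 ++ p.2.2.1 ++ p.2.2.2.2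
  else if (["count", "total", "how many", "statistics"].any (fun word => PySem.Str.isIn word (PySem.Str.lower user_question))) then
    p.2.2.1 ++ p.2.1 ++ p.1 ++ p.2.2.2.1 ++ p.2.2.2.2
  else
    p.2.1 ++ p.1 ++ p.2.2.1 ++ p.2.2.2.1 ++ p.2.2.2.2

-- ===== PORT B =====
-- category code of one result: 0 data_records, 1 column_info, 2 statistics, 3 key_value_pairs, 4 general
def pvCategory (result : List (String × String)) : Int :=
  if PySem.Str.isIn "record" (pvContent result) && (PySem.Str.isIn "row" (pvContent result) || PySem.Str.isIn ":" (pvContent result)) then 0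
  else if PySem.Str.isIn "column" (pvContent result) && (PySem.Str.isIn "information" (pvContent result) || PySem.Str.isIn "summary" (pvContent result)) then 1
  else if (["average", "min", "max", "total", "count", "summary"].any (fun s => PySem.Str.isIn s (pvContent result))) then 2
  else if PySem.Str.isIn "contains" (pvContent result) || PySem.Str.isIn "key-value" (pvContent result) then 3
  else 4

def intelligent_chunk_prioritization_for_csv_alt (search_results : List (List (String × String))) (user_question : String) : List (List (String × String)) :=
  if (["find", "search", "show", "records"].any (fun w => PySem.Str.isIn w (PySem.Str.lower user_question))) then
    PySem.List.sorted search_results (fun r => (PySem.List.pyGet? ([0, 2, 3, 1, 4] : List Int) (pvCategory r)).getD 0) false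
  else if (["count", "total", "how many", "statistics"].any (fun w => PySem.Str.isIn w (PySem.Str.lower user_question))) then
    PySem.List.sorted search_results (fun r => (PySem.List.pyGet? ([2, 1, 0, 3, 4] : List Int) (pvCategory r)).getD 0) false
  else
    PySem.List.sorted search_results (fun r => (PySem.List.pyGet? ([1, 0, 2, 3, 4] : List Int) (pvCategory r)).getD 0) false

-- ===== PRECONDITION & SPEC =====
-- Pre_ excludes exactly the inputs where some result lacks the key 'content': Python A raises KeyError there.
def Pre_intelligent_chunk_prioritization_for_csv (search_results : List (List (String × String))) (user_question : String) : Prop :=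
  ∀ r ∈ search_results, "content" ∈ r.map Prod.fst
instance (search_results : List (List (String × String))) (user_question : String) : Decidable (Pre_intelligent_chunk_prioritization_for_csv search_results user_question) := by unfold Pre_intelligent_chunk_prioritization_for_csv; infer_instance

def pvWitness_intelligent_chunk_prioritization_for_csv : (List (List (String × String))) × String :=
  ([[("content", "record row 1")], [("content", "total count")]], "find the records")

def Spec_intelligent_chunk_prioritization_for_csv (search_results : List (List (String × String))) (user_question : String) (out : List (List (String × String))) : Prop := out = intelligent_chunk_prioritization_for_csv_alt search_results user_question
instance (search_results : List (List (String × String))) (user_question : String) (out : List (List (String × String))) : Decidable (Spec_intelligent_chunk_prioritization_for_csv search_results user_question out) := by unfold Spec_intelligent_chunk_prioritization_for_csv; infer_instance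

-- ===== CLAIM (what is proved, stated in full; the proofs are below) =====
def Claim_equal_intelligent_chunk_prioritization_for_csv : Prop := ∀ (search_results : List (List (String × String))) (user_question : String), Dom_intelligent_chunk_prioritization_for_csv search_results user_question → Pre_intelligent_chunk_prioritization_for_csv search_results user_question → Spec_intelligent_chunk_prioritization_for_csv search_results user_question (intelligent_chunk_prioritization_for_csv search_results user_question)

-- ===== LEMMAS AND PROOFS =====

-- every result falls in exactly one of the five categories
theorem pvCategory_cases (r : List (String × String)) :
    pvCategory r = 0 ∨ pvCategory r = 1 ∨ pvCategory r = 2 ∨ pvCategory r = 3 ∨ pvCategory r = 4 := by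
  unfold pvCategory
  split_ifs <;> simp

-- A's loop body, rewritten through the category code
theorem pvStepA_eq (acc : List (List (String × String)) × List (List (String × String)) × List (List (String × String)) × List (List (String × String)) × List (List (String × String))) (r : List (String × String)) :
    pvStepA acc r =
      (acc.1 ++ (if pvCategory r == 0 then [r] else []),
       acc.2.1 ++ (if pvCategory r == 1 then [r] else []),
       acc.2.2.1 ++ (if pvCategory r == 2 then [r] else []),
       acc.2.2.2.1 ++ (if pvCategory r == 3 then [r] else []),
       acc.2.2.2.2 ++ (if pvCategory r == 4 then [r] else [])) := by
  unfold pvStepA pvCategory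
  split_ifs <;> simp_all

-- A's whole loop: each bucket is the filter of its category, in input order
theorem pvFoldA_eq (xs : List (List (String × String)))
    (a0 a1 a2 a3 a4 : List (List (String × String))) :
    xs.foldl pvStepA (a0, a1, a2, a3, a4) =
      (a0 ++ xs.filter (fun r => pvCategory r == 0),
       a1 ++ xs.filter (fun r => pvCategory r == 1),
       a2 ++ xs.filter (fun r => pvCategory r == 2),
       a3 ++ xs.filter (fun r => pvCategory r == 3),
       a4 ++ xs.filter (fun r => pvCategory r == 4)) := by
  induction xs generalizing a0 a1 a2 a3 a4 with
  | nil => simp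
  | cons x xs ih =>
    rw [List.foldl_cons, pvStepA_eq, ih]
    rcases pvCategory_cases x with h | h | h | h | h <;>
      simp [List.filter_cons, h]

-- inserting x after every element it is not smaller than and before every larger one
theorem pvInsertBy_middle {α : Type} (key : α → Int) (x : α) (l1 l2 : List α)
    (h1 : ∀ y ∈ l1, ¬ key x < key y) (h2 : ∀ y ∈ l2, key x < key y) :
    PySem.List.insertBy (fun a b => decide (key a < key b)) x (l1 ++ l2) = l1 ++ x :: l2 := by
  induction l1 with
  | nil =>
    cases l2 with
    | nil => simp [PySem.List.insertBy]
    | cons z zs => simp [PySem.List.insertBy, h2 z (by simp)]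
  | cons a l1 ih =>
    simp only [List.cons_append, PySem.List.insertBy]
    rw [if_neg (by simpa using h1 a (by simp)), ih (fun y hy => h1 y (by simp [hy])) ]

-- Python's stable sort over a five-valued key is the concatenation of the five key-buckets
theorem pvSortedFive {α : Type} (xs : List α) (key : α → Int)
    (h : ∀ a ∈ xs, key a = 0 ∨ key a = 1 ∨ key a = 2 ∨ key a = 3 ∨ key a = 4) :
    PySem.List.sorted xs key false =
      xs.filter (fun a => key a == 0) ++ xs.filter (fun a => key a == 1) ++
      xs.filter (fun a => key a == 2) ++ xs.filter (fun a => key a == 3) ++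
      xs.filter (fun a => key a == 4) := by
  rw [PySem.List.sorted_eq_foldl_insertBy]
  induction xs using List.reverseRecOn with
  | nil => simp
  | append_singleton ys x ih =>
    rw [List.foldl_append, List.foldl_cons, List.foldl_nil,
        ih (fun a ha => h a (by simp [ha]))]
    have hmem : ∀ (j : Int) (y : α), y ∈ ys.filter (fun a => key a == j) → key y = j := by
      intro j y hy
      simpa using (List.mem_filter.mp hy).2
    have hx := h x (by simp)
    rcases hx with hk | hk | hk | hk | hk
    · rw [show ys.filter (fun a => key a == 0) ++ ys.filter (fun a => key a == 1) ++
            ys.filter (fun a => key a == 2) ++ ys.filter (fun a => key a == 3) ++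
            ys.filter (fun a => key a == 4) =
          ys.filter (fun a => key a == 0) ++
            (ys.filter (fun a => key a == 1) ++ ys.filter (fun a => key a == 2) ++
             ys.filter (fun a => key a == 3) ++ ys.filter (fun a => key a == 4)) by
            simp [List.append_assoc]]
      rw [pvInsertBy_middle key x _ _
        (fun y hy => by have := hmem 0 y hy; omega)
        (fun y hy => by
          simp only [List.append_assoc, List.mem_append] at hy
          rcases hy with hy | hy | hy | hy
          · have := hmem 1 y hy; omega
          · have := hmem 2 y hy; omega
          · have := hmem 3 y hy; omega
          · have := hmem 4 y hy; omega)]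
      simp [List.filter_append, hk, List.append_assoc]
    · rw [show ys.filter (fun a => key a == 0) ++ ys.filter (fun a => key a == 1) ++
            ys.filter (fun a => key a == 2) ++ ys.filter (fun a => key a == 3) ++
            ys.filter (fun a => key a == 4) =
          (ys.filter (fun a => key a == 0) ++ ys.filter (fun a => key a == 1)) ++
            (ys.filter (fun a => key a == 2) ++ ys.filter (fun a => key a == 3) ++
             ys.filter (fun a => key a == 4)) by
            simp [List.append_assoc]]
      rw [pvInsertBy_middle key x _ _
        (fun y hy => by
          simp only [List.mem_append] at hy
          rcases hy with hy | hy
          · have := hmem 0 y hy; omega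
          · have := hmem 1 y hy; omega)
        (fun y hy => by
          simp only [List.append_assoc, List.mem_append] at hy
          rcases hy with hy | hy | hy
          · have := hmem 2 y hy; omega
          · have := hmem 3 y hy; omega
          · have := hmem 4 y hy; omega)]
      simp [List.filter_append, hk, List.append_assoc]
    · rw [show ys.filter (fun a => key a == 0) ++ ys.filter (fun a => key a == 1) ++
            ys.filter (fun a => key a == 2) ++ ys.filter (fun a => key a == 3) ++
            ys.filter (fun a => key a == 4) =
          (ys.filter (fun a => key a == 0) ++ ys.filter (fun a => key a == 1) ++
             ys.filter (fun a => key a == 2)) ++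
            (ys.filter (fun a => key a == 3) ++ ys.filter (fun a => key a == 4)) by
            simp [List.append_assoc]]
      rw [pvInsertBy_middle key x _ _
        (fun y hy => by
          simp only [List.append_assoc, List.mem_append] at hy
          rcases hy with hy | hy | hy
          · have := hmem 0 y hy; omega
          · have := hmem 1 y hy; omega
          · have := hmem 2 y hy; omega)
        (fun y hy => by
          simp only [List.mem_append] at hy
          rcases hy with hy | hy
          · have := hmem 3 y hy; omega
          · have := hmem 4 y hy; omega)]
      simp [List.filter_append, hk, List.append_assoc]
    · rw [show ys.filter (fun a => key a == 0) ++ ys.filter (fun a => key a == 1) ++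
            ys.filter (fun a => key a == 2) ++ ys.filter (fun a => key a == 3) ++
            ys.filter (fun a => key a == 4) =
          (ys.filter (fun a => key a == 0) ++ ys.filter (fun a => key a == 1) ++
             ys.filter (fun a => key a == 2) ++ ys.filter (fun a => key a == 3)) ++
            (ys.filter (fun a => key a == 4)) by
            simp [List.append_assoc]]
      rw [pvInsertBy_middle key x _ _
        (fun y hy => by
          simp only [List.append_assoc, List.mem_append] at hy
          rcases hy with hy | hy | hy | hy
          · have := hmem 0 y hy; omega
          · have := hmem 1 y hy; omega
          · have := hmem 2 y hy; omega
          · have := hmem 3 y hy; omega)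
        (fun y hy => by have := hmem 4 y hy; omega)]
      simp [List.filter_append, hk, List.append_assoc]
    · rw [show ys.filter (fun a => key a == 0) ++ ys.filter (fun a => key a == 1) ++
            ys.filter (fun a => key a == 2) ++ ys.filter (fun a => key a == 3) ++
            ys.filter (fun a => key a == 4) =
          (ys.filter (fun a => key a == 0) ++ ys.filter (fun a => key a == 1) ++
             ys.filter (fun a => key a == 2) ++ ys.filter (fun a => key a == 3) ++
             ys.filter (fun a => key a == 4)) ++ ([] : List α) by simp]
      rw [pvInsertBy_middle key x _ _
        (fun y hy => by
          simp only [List.append_assoc, List.mem_append] at hy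
          rcases hy with hy | hy | hy | hy | hy
          · have := hmem 0 y hy; omega
          · have := hmem 1 y hy; omega
          · have := hmem 2 y hy; omega
          · have := hmem 3 y hy; omega
          · have := hmem 4 y hy; omega)
        (fun y hy => by simp at hy)]
      simp [List.filter_append, hk, List.append_assoc]

-- the rank key of B, bucketed by j, is the category filter of the matching category
theorem pvFilterKey (xs : List (List (String × String))) (rank : List Int) (j c : Int)
    (hjc : ∀ k : Int, k = 0 ∨ k = 1 ∨ k = 2 ∨ k = 3 ∨ k = 4 →
      (((PySem.List.pyGet? rank k).getD 0 == j) = (k == c))) :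
    xs.filter (fun r => (PySem.List.pyGet? rank (pvCategory r)).getD 0 == j) =
      xs.filter (fun r => pvCategory r == c) := by
  apply List.filter_congr
  intro r _
  exact hjc (pvCategory r) (pvCategory_cases r)

-- ===== VERDICT (by name: the statement is the Claim_ definition above) =====
theorem intelligent_chunk_prioritization_for_csv_spec : Claim_equal_intelligent_chunk_prioritization_for_csv := by
  intro search_results user_question _ _
  unfold Spec_intelligent_chunk_prioritization_for_csv
  unfold intelligent_chunk_prioritization_for_csv intelligent_chunk_prioritization_for_csv_alt
  simp only [pvFoldA_eq, List.nil_append]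
  split_ifs with h1 h2
  · refine Eq.trans ?_ (pvSortedFive search_results (fun r => (PySem.List.pyGet? [0, 2, 3, 1, 4] (pvCategory r)).getD 0) (fun a _ => by
      rcases pvCategory_cases a with h | h | h | h | h <;> simp only [h] <;> decide)).symm
    simp only [
      pvFilterKey search_results [0, 2, 3, 1, 4] 0 0 (fun k hk => by rcases hk with h | h | h | h | h <;> subst h <;> decide),
      pvFilterKey search_results [0, 2, 3, 1, 4] 1 3 (fun k hk => by rcases hk with h | h | h | h | h <;> subst h <;> decide),
      pvFilterKey search_results [0, 2, 3, 1, 4] 2 1 (fun k hk => by rcases hk with h | h | h | h | h <;> subst h <;> decide),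
      pvFilterKey search_results [0, 2, 3, 1, 4] 3 2 (fun k hk => by rcases hk with h | h | h | h | h <;> subst h <;> decide),
      pvFilterKey search_results [0, 2, 3, 1, 4] 4 4 (fun k hk => by rcases hk with h | h | h | h | h <;> subst h <;> decide)]
  · refine Eq.trans ?_ (pvSortedFive search_results (fun r => (PySem.List.pyGet? [2, 1, 0, 3, 4] (pvCategory r)).getD 0) (fun a _ => by
      rcases pvCategory_cases a with h | h | h | h | h <;> simp only [h] <;> decide)).symm
    simp only [
      pvFilterKey search_results [2, 1, 0, 3, 4] 0 2 (fun k hk => by rcases hk with h | h | h | h | h <;> subst h <;> decide),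
      pvFilterKey search_results [2, 1, 0, 3, 4] 1 1 (fun k hk => by rcases hk with h | h | h | h | h <;> subst h <;> decide),
      pvFilterKey search_results [2, 1, 0, 3, 4] 2 0 (fun k hk => by rcases hk with h | h | h | h | h <;> subst h <;> decide),
      pvFilterKey search_results [2, 1, 0, 3, 4] 3 3 (fun k hk => by rcases hk with h | h | h | h | h <;> subst h <;> decide),
      pvFilterKey search_results [2, 1, 0, 3, 4] 4 4 (fun k hk => by rcases hk with h | h | h | h | h <;> subst h <;> decide)]
  · refine Eq.trans ?_ (pvSortedFive search_results (fun r => (PySem.List.pyGet? [1, 0, 2, 3, 4] (pvCategory r)).getD 0) (fun a _ => by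
      rcases pvCategory_cases a with h | h | h | h | h <;> simp only [h] <;> decide)).symm
    simp only [
      pvFilterKey search_results [1, 0, 2, 3, 4] 0 1 (fun k hk => by rcases hk with h | h | h | h | h <;> subst h <;> decide),
      pvFilterKey search_results [1, 0, 2, 3, 4] 1 0 (fun k hk => by rcases hk with h | h | h | h | h <;> subst h <;> decide),
      pvFilterKey search_results [1, 0, 2, 3, 4] 2 2 (fun k hk => by rcases hk with h | h | h | h | h <;> subst h <;> decide),
      pvFilterKey search_results [1, 0, 2, 3, 4] 3 3 (fun k hk => by rcases hk with h | h | h | h | h <;> subst h <;> decide),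
      pvFilterKey search_results [1, 0, 2, 3, 4] 4 4 (fun k hk => by rcases hk with h | h | h | h | h <;> subst h <;> decide)]
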